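-- pv_equiv track=rewrite | github.com/Ensembl/ensembl-dauphin-style-compiler | backend-server/app/data/util.py | domino_series_expand
-- ===== SOURCE A (Python) =====
-- from typing import Any, List, Tuple
--
-- def domino_series_expand(data: List[Any], distance: int) -> List[Any]:
--     """
--
--     Args:
--         data (List[Any]):
--         distance (int):
--
--     Returns:
--         List[Any]
--     """
--     out = data[:]
--     for (i, x) in enumerate(data):
--         if x > 0:
--             for delta in range(1, distance + 1):
--                 if i + delta >= len(out):
--                     break
--                 if data[i + delta] == 0 and out[i + delta] == 0:
--                     out[i + delta] = x
--                 else: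
--                     break
--             for delta in range(1, distance + 1):
--                 if i - delta < 0:
--                     break
--                 if data[i - delta] == 0 and out[i - delta] == 0:
--                     out[i - delta] = x
--                 else:
--                     break
--     return out
-- ===== SOURCE B (Python) =====
-- def domino_series_expand(data, distance):
--     """Per-cell closed form: each zero cell takes the value of the nearest
--     non-zero neighbour, preferring the left, if that neighbour is positive
--     and within `distance`; otherwise it stays zero."""
--     n = len(data)
--     out = []
--     for k in range(n):
--         v = data[k]
--         if v != 0:
--             out.append(v)
--             continue
--         p = k - 1
--         while p >= 0 and data[p] == 0:
--             p -= 1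
--         if p >= 0 and data[p] > 0 and k - p <= distance:
--             out.append(data[p])
--             continue
--         q = k + 1
--         while q < n and data[q] == 0:
--             q += 1
--         if q < n and data[q] > 0 and q - k <= distance:
--             out.append(data[q])
--         else:
--             out.append(0)
--     return out
-- ===== Notes on version B (the rewrite author's own statement) =====
-- stated objective: alternative
-- what changed: A mutates a copy in place, spreading each positive value rightwards then leftwards with break-on-filled logic; B computes each output cell independently by a closed form: a zero cell takes the nearest non-zero neighbour's value (left preferred) when that neighbour is positive and within distance.
import Mathlib
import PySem

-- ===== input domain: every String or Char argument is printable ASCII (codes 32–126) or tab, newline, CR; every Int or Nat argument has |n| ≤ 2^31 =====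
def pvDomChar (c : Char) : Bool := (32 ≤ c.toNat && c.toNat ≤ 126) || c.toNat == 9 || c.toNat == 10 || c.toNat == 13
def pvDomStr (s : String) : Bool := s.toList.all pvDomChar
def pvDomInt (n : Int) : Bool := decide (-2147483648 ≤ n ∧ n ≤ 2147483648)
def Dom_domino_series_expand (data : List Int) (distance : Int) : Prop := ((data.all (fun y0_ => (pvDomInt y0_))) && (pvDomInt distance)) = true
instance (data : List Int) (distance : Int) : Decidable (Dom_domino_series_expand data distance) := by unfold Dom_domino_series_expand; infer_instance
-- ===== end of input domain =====

-- B replaces A's in-place bidirectional spreading from each positive cell by a per-cell closed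
-- form (nearest non-zero neighbour, left preferred, if positive and within distance);
-- objective: alternative decomposition, same exact return value.

-- ===== PORT A =====
-- inner `for delta in range(1, distance+1)` loop spreading x rightwards from i, with break
def aFillR (data : List Int) (i x distance : Int) (out : List Int) (δ : Int) : List Int :=
  if δ < distance + 1 then
    if (out.length : Int) ≤ i + δ then out
    else if PySem.List.pyGet? data (i + δ) = some 0 ∧ PySem.List.pyGet? out (i + δ) = some 0 then
      aFillR data i x distance (PySem.List.pySetD out (i + δ) x) (δ + 1)
    else out
  else out
termination_by (distance + 1 - δ).toNat
decreasing_by omega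

-- inner loop spreading x leftwards from i, with break
def aFillL (data : List Int) (i x distance : Int) (out : List Int) (δ : Int) : List Int :=
  if δ < distance + 1 then
    if i - δ < 0 then out
    else if PySem.List.pyGet? data (i - δ) = some 0 ∧ PySem.List.pyGet? out (i - δ) = some 0 then
      aFillL data i x distance (PySem.List.pySetD out (i - δ) x) (δ + 1)
    else out
  else out
termination_by (distance + 1 - δ).toNat
decreasing_by omega

-- body of the outer `for (i, x) in enumerate(data)` loop
def aStep (data : List Int) (distance : Int) (out : List Int) (ix : Int × Int) : List Int :=
  if ix.2 > 0 then
    aFillL data ix.1 ix.2 distance (aFillR data ix.1 ix.2 distance out 1) 1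
  else out

def domino_series_expand (data : List Int) (distance : Int) : List Int :=
  (PySem.List.enumerate data 0).foldl (aStep data distance) data

-- ===== PORT B =====
-- `p = k-1; while p >= 0 and data[p] == 0: p -= 1` (indices stay in range, so plain getD)
def bScanL (data : List Int) : Nat → Option Nat
  | 0 => none
  | p + 1 => if data.getD p 0 ≠ 0 then some p else bScanL data p

-- `q = k+1; while q < n and data[q] == 0: q += 1`
def bScanR (data : List Int) (q : Nat) : Option Nat :=
  if q < data.length then
    (if data.getD q 0 ≠ 0 then some q else bScanR data (q + 1))
  else none
termination_by data.length - q

-- the value B appends for index k (one iteration of B's `for k in range(n)` loop)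
def bCell (data : List Int) (distance : Int) (k : Nat) : Int :=
  let v := data.getD k 0
  if v ≠ 0 then v
  else
    let rt : Int :=
      match bScanR data (k + 1) with
      | some q => if data.getD q 0 > 0 ∧ (q : Int) - (k : Int) ≤ distance then data.getD q 0 else 0
      | none => 0
    match bScanL data k with
    | some p => if data.getD p 0 > 0 ∧ (k : Int) - (p : Int) ≤ distance then data.getD p 0 else rt
    | none => rt

def domino_series_expand_alt (data : List Int) (distance : Int) : List Int :=
  (List.range data.length).map (bCell data distance)

-- ===== PRECONDITION & SPEC =====
def Spec_domino_series_expand (data : List Int) (distance : Int) (out : List Int) : Prop := out = domino_series_expand_alt data distance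
instance (data : List Int) (distance : Int) (out : List Int) : Decidable (Spec_domino_series_expand data distance out) := by unfold Spec_domino_series_expand; infer_instance

-- ===== CLAIM (what is proved, stated in full; the proofs are below) =====
def Claim_equal_domino_series_expand : Prop := ∀ (data : List Int) (distance : Int), Dom_domino_series_expand data distance → Spec_domino_series_expand data distance (domino_series_expand data distance)

-- ===== LEMMAS AND PROOFS =====

lemma getD_set_eq (l : List Int) (m k : Nat) (v : Int) (h : m < l.length) :
    (l.set m v).getD k 0 = if k = m then v else l.getD k 0 := by
  by_cases e : k = m
  · subst e; simp [List.getD_eq_getElem?_getD, List.getElem?_set, h]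
  · rw [List.getD_eq_getElem?_getD, List.getD_eq_getElem?_getD, List.getElem?_set,
      if_neg (fun hh : m = k => e hh.symm), if_neg e]

lemma pyGet?_eq_some_getD (xs : List Int) (M : Nat) (h : M < xs.length) :
    PySem.List.pyGet? xs ((M : Nat) : Int) = some (xs.getD M 0) := by
  rw [PySem.List.pyGet?_natCast, List.getD_eq_getElem?_getD, List.getElem?_eq_getElem h]; rfl

lemma fillR_char (data : List Int) (x : Int) (distance : Int) (i : Nat) :
    ∀ (m c : Nat), 1 ≤ c → (distance + 1 - (c : Int)).toNat ≤ m →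
    ∀ out : List Int, out.length = data.length →
      (aFillR data (i : Int) x distance out (c : Int)).length = data.length ∧
      ∀ k : Nat,
        ((i + c ≤ k ∧ k < data.length ∧ (k : Int) ≤ (i : Int) + distance ∧
           (∀ j : Nat, i + c ≤ j → j ≤ k → data.getD j 0 = 0 ∧ out.getD j 0 = 0)) →
          (aFillR data (i : Int) x distance out (c : Int)).getD k 0 = x) ∧
        (¬ (i + c ≤ k ∧ k < data.length ∧ (k : Int) ≤ (i : Int) + distance ∧
           (∀ j : Nat, i + c ≤ j → j ≤ k → data.getD j 0 = 0 ∧ out.getD j 0 = 0)) →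
          (aFillR data (i : Int) x distance out (c : Int)).getD k 0 = out.getD k 0) := by
  intro m
  induction m with
  | zero =>
    intro c hc hm out hout
    have heq : aFillR data (i : Int) x distance out (c : Int) = out := by
      unfold aFillR; rw [if_neg (by omega : ¬ ((c : Int) < distance + 1))]
    rw [heq]
    refine ⟨hout, fun k => ⟨fun hcond => ?_, fun _ => rfl⟩⟩
    exfalso; rcases hcond with ⟨h1, h2, h3, _⟩
    have : ((i + c : Nat) : Int) ≤ (k : Nat) := by exact_mod_cast Nat.cast_le.mpr h1
    push_cast at this; omega
  | succ m ih =>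
    intro c hc hm out hout
    by_cases hend : distance + 1 ≤ (c : Int)
    · have heq : aFillR data (i : Int) x distance out (c : Int) = out := by
        unfold aFillR; rw [if_neg (by omega : ¬ ((c : Int) < distance + 1))]
      rw [heq]
      refine ⟨hout, fun k => ⟨fun hcond => ?_, fun _ => rfl⟩⟩
      exfalso; rcases hcond with ⟨h1, h2, h3, _⟩
      have : ((i + c : Nat) : Int) ≤ (k : Nat) := by exact_mod_cast Nat.cast_le.mpr h1
      push_cast at this; omega
    · push_neg at hend
      set M : Nat := i + c with hM
      have hcast : (i : Int) + (c : Int) = (M : Int) := by rw [hM]; push_cast; ring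
      have heq : aFillR data (i : Int) x distance out (c : Int) =
          (if (out.length : Int) ≤ (M : Int) then out
           else if PySem.List.pyGet? data (M : Int) = some 0 ∧ PySem.List.pyGet? out (M : Int) = some 0 then
             aFillR data (i : Int) x distance (PySem.List.pySetD out (M : Int) x) ((c : Int) + 1)
           else out) := by
        conv_lhs => rw [aFillR]
        rw [if_pos (by omega : (c : Int) < distance + 1), hcast]
      rw [heq]
      by_cases hn : (out.length : Int) ≤ (M : Int)
      · rw [if_pos hn]
        refine ⟨hout, fun k => ⟨fun hcond => ?_, fun _ => rfl⟩⟩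
        exfalso; rcases hcond with ⟨h1, h2, _, _⟩
        have : (M : Int) ≤ (k : Int) := by exact_mod_cast Nat.cast_le.mpr h1
        have : (k : Int) < (out.length : Int) := by exact_mod_cast Nat.cast_lt.mpr (hout ▸ h2)
        omega
      · rw [if_neg hn]
        have hMlt : M < data.length := by
          rw [← hout]; exact_mod_cast (by omega : (M : Int) < (out.length : Int))
        have hMout : M < out.length := by omega
        rw [pyGet?_eq_some_getD data M hMlt, pyGet?_eq_some_getD out M hMout]
        by_cases hz : data.getD M 0 = 0 ∧ out.getD M 0 = 0
        · rw [if_pos (by rw [hz.1, hz.2]; exact ⟨rfl, rfl⟩)]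
          rw [PySem.List.pySetD_natCast, show ((c : Int) + 1) = ((c + 1 : Nat) : Int) by push_cast; ring]
          have hrec := ih (c + 1) (by omega) (by omega) (out.set M x) (by simp [hout])
          refine ⟨hrec.1, fun k => ⟨fun hcond => ?_, fun hcond => ?_⟩⟩
          · -- cond holds: either k = M or k ≥ M + 1
            rcases Nat.lt_or_ge k (M + 1) with hk | hk
            · have hkM : k = M := by omega
              rw [(hrec.2 k).2 (fun h => absurd h.1 (by omega)), getD_set_eq _ _ _ _ hMout,
                if_pos hkM]
            · rcases hcond with ⟨h1, h2, h3, h4⟩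
              refine (hrec.2 k).1 ⟨by omega, h2, h3, fun j hj1 hj2 => ?_⟩
              have := h4 j (by omega) hj2
              exact ⟨this.1, by rw [getD_set_eq _ _ _ _ hMout, if_neg (by omega)]; exact this.2⟩
          · -- cond fails at k: then also IH-cond fails, and k ≠ M
            have hkM : k ≠ M := by
              intro e
              refine hcond ⟨by omega, by omega, by omega, fun j hj1 hj2 => ?_⟩
              have hjM : j = M := by omega
              rw [hjM]; exact hz
            have := (hrec.2 k).2 (by
              intro ⟨h1, h2, h3, h4⟩
              refine hcond ⟨by omega, h2, h3, fun j hj1 hj2 => ?_⟩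
              rcases Nat.lt_or_ge j (M + 1) with hj | hj
              · have hjM : j = M := by omega
                rw [hjM]; exact hz
              · have := h4 j (by omega) hj2
                exact ⟨this.1, by rw [getD_set_eq _ _ _ _ hMout, if_neg (by omega)] at this; exact this.2⟩)
            rw [this, getD_set_eq _ _ _ _ hMout, if_neg hkM]
        · rw [if_neg (by
            intro ⟨ha, hb⟩
            exact hz ⟨Option.some.inj ha, Option.some.inj hb⟩)]
          refine ⟨hout, fun k => ⟨fun hcond => ?_, fun _ => rfl⟩⟩
          exfalso; rcases hcond with ⟨h1, h2, h3, h4⟩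
          exact hz (h4 M (by omega) (by omega))

lemma fillL_char (data : List Int) (x : Int) (distance : Int) (i : Nat) (hin : i ≤ data.length) :
    ∀ (m c : Nat), 1 ≤ c → (distance + 1 - (c : Int)).toNat ≤ m →
    ∀ out : List Int, out.length = data.length →
      (aFillL data (i : Int) x distance out (c : Int)).length = data.length ∧
      ∀ k : Nat,
        ((k + c ≤ i ∧ (i : Int) - (k : Int) ≤ distance ∧
           (∀ j : Nat, k ≤ j → j + c ≤ i → data.getD j 0 = 0 ∧ out.getD j 0 = 0)) →
          (aFillL data (i : Int) x distance out (c : Int)).getD k 0 = x) ∧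
        (¬ (k + c ≤ i ∧ (i : Int) - (k : Int) ≤ distance ∧
           (∀ j : Nat, k ≤ j → j + c ≤ i → data.getD j 0 = 0 ∧ out.getD j 0 = 0)) →
          (aFillL data (i : Int) x distance out (c : Int)).getD k 0 = out.getD k 0) := by
  intro m
  induction m with
  | zero =>
    intro c hc hm out hout
    have heq : aFillL data (i : Int) x distance out (c : Int) = out := by
      unfold aFillL; rw [if_neg (by omega : ¬ ((c : Int) < distance + 1))]
    rw [heq]
    refine ⟨hout, fun k => ⟨fun hcond => ?_, fun _ => rfl⟩⟩
    exfalso; rcases hcond with ⟨h1, h2, _⟩; omega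
  | succ m ih =>
    intro c hc hm out hout
    by_cases hend : distance + 1 ≤ (c : Int)
    · have heq : aFillL data (i : Int) x distance out (c : Int) = out := by
        unfold aFillL; rw [if_neg (by omega : ¬ ((c : Int) < distance + 1))]
      rw [heq]
      refine ⟨hout, fun k => ⟨fun hcond => ?_, fun _ => rfl⟩⟩
      exfalso; rcases hcond with ⟨h1, h2, _⟩; omega
    · push_neg at hend
      by_cases hci : i < c
      · have heq : aFillL data (i : Int) x distance out (c : Int) = out := by
          unfold aFillL
          rw [if_pos (by omega : (c : Int) < distance + 1),
            if_pos (by omega : (i : Int) - (c : Int) < 0)]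
        rw [heq]
        refine ⟨hout, fun k => ⟨fun hcond => ?_, fun _ => rfl⟩⟩
        exfalso; rcases hcond with ⟨h1, _, _⟩; omega
      · push_neg at hci
        set M : Nat := i - c with hM
        have hcast : (i : Int) - (c : Int) = (M : Int) := by rw [hM]; push_cast; omega
        have heq : aFillL data (i : Int) x distance out (c : Int) =
            (if PySem.List.pyGet? data (M : Int) = some 0 ∧ PySem.List.pyGet? out (M : Int) = some 0 then
               aFillL data (i : Int) x distance (PySem.List.pySetD out (M : Int) x) ((c : Int) + 1)
             else out) := by
          conv_lhs => rw [aFillL]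
          rw [if_pos (by omega : (c : Int) < distance + 1), hcast,
            if_neg (by omega : ¬ ((M : Int) < 0))]
        rw [heq]
        have hMlt : M < data.length := by omega
        have hMout : M < out.length := by omega
        rw [pyGet?_eq_some_getD data M hMlt, pyGet?_eq_some_getD out M hMout]
        by_cases hz : data.getD M 0 = 0 ∧ out.getD M 0 = 0
        · rw [if_pos (by rw [hz.1, hz.2]; exact ⟨rfl, rfl⟩)]
          rw [PySem.List.pySetD_natCast, show ((c : Int) + 1) = ((c + 1 : Nat) : Int) by push_cast; ring]
          have hrec := ih (c + 1) (by omega) (by omega) (out.set M x) (by simp [hout])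
          refine ⟨hrec.1, fun k => ⟨fun hcond => ?_, fun hcond => ?_⟩⟩
          · rcases Nat.lt_or_ge M k with hk | hk
            · exfalso; rcases hcond with ⟨h1, _, _⟩; omega
            · rcases Nat.eq_or_lt_of_le hk with hkM | hkM
              · rw [(hrec.2 k).2 (fun h => absurd h.1 (by omega)), getD_set_eq _ _ _ _ hMout,
                  if_pos hkM]
              · rcases hcond with ⟨h1, h2, h3⟩
                refine (hrec.2 k).1 ⟨by omega, h2, fun j hj1 hj2 => ?_⟩
                have := h3 j hj1 (by omega)
                exact ⟨this.1, by rw [getD_set_eq _ _ _ _ hMout, if_neg (by omega)]; exact this.2⟩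
          · have hkM : k ≠ M := by
              intro e
              refine hcond ⟨by omega, by omega, fun j hj1 hj2 => ?_⟩
              have hjM : j = M := by omega
              rw [hjM]; exact hz
            have := (hrec.2 k).2 (by
              intro ⟨h1, h2, h3⟩
              refine hcond ⟨by omega, h2, fun j hj1 hj2 => ?_⟩
              rcases Nat.lt_or_ge j M with hj | hj
              · have := h3 j hj1 (by omega)
                exact ⟨this.1, by rw [getD_set_eq _ _ _ _ hMout, if_neg (by omega)] at this; exact this.2⟩
              · have hjM : j = M := by omega
                rw [hjM]; exact hz)
            rw [this, getD_set_eq _ _ _ _ hMout, if_neg hkM]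
        · rw [if_neg (by
            intro ⟨ha, hb⟩
            exact hz ⟨Option.some.inj ha, Option.some.inj hb⟩)]
          refine ⟨hout, fun k => ⟨fun hcond => ?_, fun _ => rfl⟩⟩
          exfalso; rcases hcond with ⟨h1, h2, h3⟩
          exact hz (h3 M (by omega) (by omega))

lemma bScanL_eq_some_iff (data : List Int) (k p : Nat) :
    bScanL data k = some p ↔ p < k ∧ data.getD p 0 ≠ 0 ∧ ∀ j, p < j → j < k → data.getD j 0 = 0 := by
  induction k with
  | zero => simp [bScanL]
  | succ k ih =>
    by_cases h : data.getD k 0 ≠ 0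
    · simp only [bScanL, if_pos h]
      constructor
      · rintro ⟨rfl⟩; exact ⟨by omega, h, by omega⟩
      · rintro ⟨h1, h2, h3⟩
        rcases Nat.lt_or_ge p k with hp | hp
        · exact absurd (h3 k hp (by omega)) h
        · have hpk : p = k := by omega
          simp [hpk]
    · rw [not_not] at h
      have e : bScanL data (k+1) = bScanL data k := by rw [show bScanL data (k+1) = if data.getD k 0 ≠ 0 then some k else bScanL data k from rfl, if_neg (not_not_intro h)]
      rw [e, ih]
      constructor
      · rintro ⟨h1, h2, h3⟩
        refine ⟨by omega, h2, fun j hj1 hj2 => ?_⟩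
        rcases Nat.lt_or_ge j k with hj | hj
        · exact h3 j hj1 hj
        · have hjk : j = k := by omega
          rw [hjk]; exact h
      · rintro ⟨h1, h2, h3⟩
        have hpk : p ≠ k := fun e => h2 (e ▸ h)
        exact ⟨by omega, h2, fun j hj1 hj2 => h3 j hj1 (by omega)⟩

lemma bScanL_eq_none_iff (data : List Int) (k : Nat) :
    bScanL data k = none ↔ ∀ j, j < k → data.getD j 0 = 0 := by
  induction k with
  | zero => simp [bScanL]
  | succ k ih =>
    by_cases h : data.getD k 0 ≠ 0
    · simp only [bScanL, if_pos h]
      constructor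
      · simp
      · intro h3; exact absurd (h3 k (by omega)) h
    · rw [not_not] at h
      have e : bScanL data (k+1) = bScanL data k := by rw [show bScanL data (k+1) = if data.getD k 0 ≠ 0 then some k else bScanL data k from rfl, if_neg (not_not_intro h)]
      rw [e, ih]
      constructor
      · intro h3 j hj
        rcases Nat.lt_or_ge j k with hj' | hj'
        · exact h3 j hj'
        · have hjk : j = k := by omega
          rw [hjk]; exact h
      · intro h3 j hj; exact h3 j (by omega)

lemma bScanR_eq_some_iff (data : List Int) (q r : Nat) :
    bScanR data q = some r ↔ q ≤ r ∧ r < data.length ∧ data.getD r 0 ≠ 0 ∧ ∀ j, q ≤ j → j < r → data.getD j 0 = 0 := by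
  fun_induction bScanR data q with
  | case1 q hq h =>
    constructor
    · rintro ⟨rfl⟩; exact ⟨le_refl _, hq, h, by omega⟩
    · rintro ⟨h1, h2, h3, h4⟩
      rcases Nat.lt_or_ge q r with hr | hr
      · exact absurd (h4 q (le_refl _) hr) h
      · have : q = r := by omega
        simp [this]
  | case2 q hq h ih =>
    rw [not_not] at h
    rw [ih]
    constructor
    · rintro ⟨h1, h2, h3, h4⟩
      refine ⟨by omega, h2, h3, fun j hj1 hj2 => ?_⟩
      rcases Nat.lt_or_ge j (q+1) with hj | hj
      · have hjq : j = q := by omega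
        rw [hjq]; exact h
      · exact h4 j hj hj2
    · rintro ⟨h1, h2, h3, h4⟩
      have hqr : q ≠ r := fun e => h3 (e ▸ h)
      exact ⟨by omega, h2, h3, fun j hj1 hj2 => h4 j (by omega) hj2⟩
  | case3 q hq =>
    constructor
    · simp
    · rintro ⟨h1, h2, h3, h4⟩; omega

lemma bScanR_eq_none_iff (data : List Int) (q : Nat) :
    bScanR data q = none ↔ ∀ j, q ≤ j → j < data.length → data.getD j 0 = 0 := by
  fun_induction bScanR data q with
  | case1 q hq h =>
    constructor
    · simp
    · intro h3; exact absurd (h3 q (le_refl _) hq) h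
  | case2 q hq h ih =>
    rw [not_not] at h
    rw [ih]
    constructor
    · intro h3 j hj1 hj2
      rcases Nat.lt_or_ge j (q+1) with hj | hj
      · have hjq : j = q := by omega
        rw [hjq]; exact h
      · exact h3 j hj hj2
    · intro h3 j hj1 hj2; exact h3 j (by omega) hj2
  | case3 q hq =>
    constructor
    · intro _ j hj1 hj2; omega
    · intro _; rfl

def Ftgt (data : List Int) (distance : Int) (i k : Nat) : Int :=
  if data.getD k 0 ≠ 0 then data.getD k 0
  else
    let rt : Int :=
      match bScanR data (k + 1) with
      | some q => if q < i ∧ data.getD q 0 > 0 ∧ (q : Int) - (k : Int) ≤ distance then data.getD q 0 else 0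
      | none => 0
    match bScanL data k with
    | some p => if p < i ∧ data.getD p 0 > 0 ∧ (k : Int) - (p : Int) ≤ distance then data.getD p 0 else rt
    | none => rt

lemma Ftgt_of_ne (data : List Int) (distance : Int) (i k : Nat) (h : data.getD k 0 ≠ 0) :
    Ftgt data distance i k = data.getD k 0 := by
  unfold Ftgt; rw [if_pos h]

lemma Ftgt_some (data : List Int) (distance : Int) (i k p : Nat)
    (hdk : data.getD k 0 = 0) (hL : bScanL data k = some p) :
    Ftgt data distance i k =
      if p < i ∧ data.getD p 0 > 0 ∧ (k : Int) - (p : Int) ≤ distance then data.getD p 0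
      else (match bScanR data (k + 1) with
        | some q => if q < i ∧ data.getD q 0 > 0 ∧ (q : Int) - (k : Int) ≤ distance then data.getD q 0 else 0
        | none => 0) := by
  unfold Ftgt; rw [if_neg (not_not_intro hdk), hL]

lemma Ftgt_none (data : List Int) (distance : Int) (i k : Nat)
    (hdk : data.getD k 0 = 0) (hL : bScanL data k = none) :
    Ftgt data distance i k =
      (match bScanR data (k + 1) with
        | some q => if q < i ∧ data.getD q 0 > 0 ∧ (q : Int) - (k : Int) ≤ distance then data.getD q 0 else 0
        | none => 0) := by
  unfold Ftgt; rw [if_neg (not_not_intro hdk), hL]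

lemma bScanL_congr (data : List Int) (k j : Nat) (hkj : k ≤ j)
    (hz : ∀ j', k ≤ j' → j' < j → data.getD j' 0 = 0) :
    bScanL data j = bScanL data k := by
  cases hK : bScanL data k with
  | none =>
    rw [bScanL_eq_none_iff] at hK ⊢
    intro j' hj'
    rcases Nat.lt_or_ge j' k with h | h
    · exact hK j' h
    · exact hz j' h hj'
  | some p =>
    rw [bScanL_eq_some_iff] at hK ⊢
    obtain ⟨h1, h2, h3⟩ := hK
    refine ⟨by omega, h2, fun j' hj1 hj2 => ?_⟩
    rcases Nat.lt_or_ge j' k with h | h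
    · exact h3 j' hj1 h
    · exact hz j' h hj2

lemma Ftgt_succ_of_nonpos (data : List Int) (distance : Int) (i : Nat)
    (hx : data.getD i 0 ≤ 0) (k : Nat) :
    Ftgt data distance (i + 1) k = Ftgt data distance i k := by
  by_cases hdk : data.getD k 0 = 0
  · cases hL : bScanL data k with
    | some p =>
      rw [Ftgt_some data distance (i+1) k p hdk hL, Ftgt_some data distance i k p hdk hL]
      have hp := (bScanL_eq_some_iff data k p).mp hL
      by_cases hpi : p = i
      · rw [if_neg (by rw [hpi]; intro h; omega), if_neg (by rw [hpi]; intro h; omega)]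
        cases hR : bScanR data (k+1) with
        | some q =>
          dsimp only
          have hq := (bScanR_eq_some_iff data (k+1) q).mp hR
          by_cases hqi : q = i
          · rw [if_neg (by rw [hqi]; intro h; omega), if_neg (by rw [hqi]; intro h; omega)]
          · simp only [show (q < i + 1) ↔ (q < i) from by constructor <;> omega]
        | none => rfl
      · have e1 : (p < i + 1) ↔ (p < i) := by constructor <;> (intro h; omega)
        simp only [e1]
        cases hR : bScanR data (k+1) with
        | some q =>
          dsimp only
          have hq := (bScanR_eq_some_iff data (k+1) q).mp hR
          by_cases hqi : q = i
          · by_cases hcl : p < i ∧ data.getD p 0 > 0 ∧ (k : Int) - (p : Int) ≤ distance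
            · rw [if_pos hcl, if_pos hcl]
            · rw [if_neg hcl, if_neg hcl, if_neg (by rw [hqi]; intro h; omega),
                if_neg (by rw [hqi]; intro h; omega)]
          · simp only [show (q < i + 1) ↔ (q < i) from by constructor <;> (intro h; omega)]
        | none => rfl
    | none =>
      rw [Ftgt_none data distance (i+1) k hdk hL, Ftgt_none data distance i k hdk hL]
      cases hR : bScanR data (k+1) with
      | some q =>
        dsimp only
        have hq := (bScanR_eq_some_iff data (k+1) q).mp hR
        by_cases hqi : q = i
        · rw [if_neg (by rw [hqi]; intro h; omega), if_neg (by rw [hqi]; intro h; omega)]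
        · simp only [show (q < i + 1) ↔ (q < i) from by constructor <;> (intro h; omega)]
      | none => rfl
  · rw [Ftgt_of_ne data distance (i+1) k hdk, Ftgt_of_ne data distance i k hdk]

lemma F_right_zero (data : List Int) (distance : Int) (i j : Nat)
    (hii : data.getD i 0 ≠ 0) (hij : i < j) (hjn : j < data.length)
    (hzz : ∀ j', i < j' → j' ≤ j → data.getD j' 0 = 0) :
    Ftgt data distance i j = 0 := by
  have hdj : data.getD j 0 = 0 := hzz j hij le_rfl
  have hL : bScanL data j = some i :=
    (bScanL_eq_some_iff data j i).mpr ⟨hij, hii, fun j' h1 h2 => hzz j' h1 (by omega)⟩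
  rw [Ftgt_some data distance i j i hdj hL, if_neg (by intro h; omega)]
  cases hR : bScanR data (j+1) with
  | some q =>
    dsimp only
    have hq := (bScanR_eq_some_iff data (j+1) q).mp hR
    rw [if_neg (by intro h; omega)]
  | none => rfl

lemma F_left_zero (data : List Int) (distance : Int) (i k j : Nat)
    (hii : data.getD i 0 ≠ 0) (hin : i < data.length) (hkj : k ≤ j) (hji : j < i)
    (hz1 : ∀ j', k ≤ j' → j' < i → data.getD j' 0 = 0)
    (hleft : ∀ p, bScanL data k = some p → ¬(data.getD p 0 > 0 ∧ (k : Int) - (p : Int) ≤ distance)) :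
    Ftgt data distance i j = 0 := by
  have hdj : data.getD j 0 = 0 := hz1 j hkj hji
  have hLj : bScanL data j = bScanL data k :=
    bScanL_congr data k j hkj (fun j' h1 h2 => hz1 j' h1 (by omega))
  have hR : bScanR data (j+1) = some i :=
    (bScanR_eq_some_iff data (j+1) i).mpr ⟨by omega, hin, hii, fun j' h1 h2 => hz1 j' (by omega) h2⟩
  cases hK : bScanL data k with
  | none =>
    rw [Ftgt_none data distance i j hdj (hLj.trans hK), hR]
    dsimp only
    rw [if_neg (by intro h; omega)]
  | some p =>
    have hp := (bScanL_eq_some_iff data k p).mp hK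
    rw [Ftgt_some data distance i j p hdj (hLj.trans hK), hR]
    rw [if_neg (by
      intro ⟨h1, h2, h3⟩
      exact hleft p hK ⟨h2, by omega⟩)]
    dsimp only
    rw [if_neg (by intro h; omega)]

lemma left_sweep_zero_case (data : List Int) (distance : Int) (i k q : Nat)
    (out1 res : List Int)
    (hx : data.getD i 0 > 0) (hi : i < data.length) (hki : k < i)
    (hdk : data.getD k 0 = 0)
    (hRk : bScanR data (k + 1) = some q) (hqle : q ≤ i)
    (hleft : ∀ p, bScanL data k = some p → ¬(data.getD p 0 > 0 ∧ (k : Int) - (p : Int) ≤ distance))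
    (Hres1 : (k + 1 ≤ i ∧ (i : Int) - (k : Int) ≤ distance ∧
        (∀ j : Nat, k ≤ j → j + 1 ≤ i → data.getD j 0 = 0 ∧ out1.getD j 0 = 0)) →
      res.getD k 0 = data.getD i 0)
    (Hres2 : (¬ (k + 1 ≤ i ∧ (i : Int) - (k : Int) ≤ distance ∧
        (∀ j : Nat, k ≤ j → j + 1 ≤ i → data.getD j 0 = 0 ∧ out1.getD j 0 = 0))) →
      res.getD k 0 = out1.getD k 0)
    (Hout1 : ∀ j, j ≤ i → out1.getD j 0 = Ftgt data distance i j) :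
    res.getD k 0 = Ftgt data distance (i + 1) k := by
  have hii : data.getD i 0 ≠ 0 := by omega
  have hq := (bScanR_eq_some_iff data (k+1) q).mp hRk
  by_cases hqi : q = i
  · have hzz : ∀ j', k ≤ j' → j' < i → data.getD j' 0 = 0 := by
      intro j' h1 h2
      rcases Nat.eq_or_lt_of_le h1 with e | h
      · rw [← e]; exact hdk
      · exact hq.2.2.2 j' (by omega) (by omega)
    by_cases hdist : (i : Int) - (k : Int) ≤ distance
    · have hres := Hres1 ⟨by omega, hdist, fun j hj1 hj2 => ⟨hzz j hj1 (by omega), by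
        rw [Hout1 j (by omega)]
        exact F_left_zero data distance i k j hii hi hj1 (by omega) hzz hleft⟩⟩
      rw [hres]
      rcases hLk : bScanL data k with _ | p
      · rw [Ftgt_none data distance (i+1) k hdk hLk, hRk]
        dsimp only
        rw [if_pos ⟨by omega, by rw [hqi]; exact hx, by omega⟩, hqi]
      · rw [Ftgt_some data distance (i+1) k p hdk hLk,
          if_neg (fun h => hleft p hLk ⟨h.2.1, h.2.2⟩), hRk]
        dsimp only
        rw [if_pos ⟨by omega, by rw [hqi]; exact hx, by omega⟩, hqi]
    · have hres := Hres2 (fun hcond => hdist hcond.2.1)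
      rw [hres, Hout1 k (by omega),
        F_left_zero data distance i k k hii hi le_rfl hki hzz hleft]
      symm
      rcases hLk : bScanL data k with _ | p
      · rw [Ftgt_none data distance (i+1) k hdk hLk, hRk]
        dsimp only
        rw [if_neg (by intro h; exact hdist (by omega))]
      · rw [Ftgt_some data distance (i+1) k p hdk hLk,
          if_neg (fun h => hleft p hLk ⟨h.2.1, h.2.2⟩), hRk]
        dsimp only
        rw [if_neg (by intro h; exact hdist (by omega))]
  · -- q < i : a non-zero datum sits strictly between k and i
    have hqlt : q < i := by omega
    have hres := Hres2 (fun hcond => (hq.2.2.1) (hcond.2.2 q (by omega) (by omega)).1)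
    rw [hres, Hout1 k (by omega)]
    rcases hLk : bScanL data k with _ | p
    · rw [Ftgt_none data distance (i+1) k hdk hLk, Ftgt_none data distance i k hdk hLk, hRk]
      dsimp only
      simp only [show (q < i + 1) ↔ (q < i) from by constructor <;> (intro h; omega)]
    · rw [Ftgt_some data distance (i+1) k p hdk hLk, Ftgt_some data distance i k p hdk hLk, hRk]
      have hp := (bScanL_eq_some_iff data k p).mp hLk
      simp only [show (p < i + 1) ↔ (p < i) from by constructor <;> (intro h; omega)]
      simp only [show (q < i + 1) ↔ (q < i) from by constructor <;> (intro h; omega)]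

lemma step_preserves (data : List Int) (distance : Int) (i : Nat) (hi : i < data.length)
    (out : List Int) (hlen : out.length = data.length)
    (hout : ∀ k, k < data.length → out.getD k 0 = Ftgt data distance i k) :
    (aStep data distance out ((i : Int), PySem.List.pyGetD data (i : Int) 0)).length = data.length ∧
    ∀ k, k < data.length → (aStep data distance out ((i : Int), PySem.List.pyGetD data (i : Int) 0)).getD k 0 =
      Ftgt data distance (i + 1) k := by
  have hxv : PySem.List.pyGetD data ((i : Nat) : Int) 0 = data.getD i 0 := by
    simp [PySem.List.pyGetD_natCast]
  unfold aStep
  dsimp only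
  rw [hxv]
  by_cases hx : data.getD i 0 > 0
  · rw [if_pos hx]
    have hii : data.getD i 0 ≠ 0 := by omega
    have hfr := fillR_char data (data.getD i 0) distance i (distance + 1 - 1).toNat 1 le_rfl
      (by simp) out hlen
    simp only [Nat.cast_one] at hfr
    have hlen1 := hfr.1
    have hfl := fillL_char data (data.getD i 0) distance i (le_of_lt hi) (distance + 1 - 1).toNat 1
      le_rfl (by simp) _ hlen1
    simp only [Nat.cast_one] at hfl
    refine ⟨hfl.1, fun k hk => ?_⟩
    have hsame : ∀ j, j ≤ i →
        (aFillR data (i : Int) (data.getD i 0) distance out 1).getD j 0 =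
          out.getD j 0 :=
      fun j hj => (hfr.2 j).2 (fun hcond => absurd hcond.1 (by omega))
    have hout1v : ∀ j, j ≤ i →
        (aFillR data (i : Int) (data.getD i 0) distance out 1).getD j 0 =
          Ftgt data distance i j :=
      fun j hj => by rw [hsame j hj]; exact hout j (by omega)
    by_cases hki : k = i
    · subst hki
      rw [(hfl.2 k).2 (fun hcond => absurd hcond.1 (by omega)), hout1v k le_rfl,
        Ftgt_of_ne data distance k k hii, Ftgt_of_ne data distance (k+1) k hii]
    · rcases Nat.lt_or_ge i k with hik | hik
      · -- k right of i: the left sweep does not reach k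
        rw [(hfl.2 k).2 (fun hcond => absurd hcond.1 (by omega))]
        by_cases hdk : data.getD k 0 = 0
        · rcases hLk : bScanL data k with _ | p
          · exact absurd ((bScanL_eq_none_iff data k).mp hLk i hik) hii
          · have hp := (bScanL_eq_some_iff data k p).mp hLk
            by_cases hpi : p = i
            · have hzz : ∀ j, i < j → j ≤ k → data.getD j 0 = 0 := by
                intro j h1 h2
                rcases Nat.lt_or_ge j k with h | h
                · exact hp.2.2 j (by omega) h
                · have hjk : j = k := by omega
                  rw [hjk]; exact hdk
              by_cases hdist : (k : Int) ≤ (i : Int) + distance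
              · rw [(hfr.2 k).1 ⟨by omega, hk, hdist, fun j hj1 hj2 => ⟨hzz j (by omega) hj2, by
                  rw [hout j (by omega)]
                  exact F_right_zero data distance i j hii (by omega) (by omega)
                    (fun j' a b => hzz j' a (by omega))⟩⟩,
                  Ftgt_some data distance (i+1) k p hdk hLk,
                  if_pos ⟨by omega, by rw [hpi]; exact hx, by rw [hpi]; omega⟩, hpi]
              · rw [(hfr.2 k).2 (fun hcond => absurd hcond.2.2.1 hdist), hout k hk,
                  Ftgt_some data distance (i+1) k p hdk hLk,
                  Ftgt_some data distance i k p hdk hLk,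
                  if_neg (by intro h; rw [hpi] at h; exact hdist (by omega)),
                  if_neg (by intro h; omega)]
                cases hR : bScanR data (k+1) with
                | some q =>
                  dsimp only
                  have hq := (bScanR_eq_some_iff data (k+1) q).mp hR
                  simp only [show (q < i + 1) ↔ (q < i) from by constructor <;> (intro h; omega)]
                | none => rfl
            · have hpg : i < p := by
                rcases Nat.lt_trichotomy i p with h | h | h
                · exact h
                · exact absurd h.symm hpi
                · exact absurd (hp.2.2 i h hik) hii
              rw [(hfr.2 k).2 (fun hcond => absurd (hcond.2.2.2 p (by omega) (by omega)).1 hp.2.1),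
                hout k hk,
                Ftgt_some data distance (i+1) k p hdk hLk,
                Ftgt_some data distance i k p hdk hLk,
                if_neg (fun h => absurd h.1 (by omega)), if_neg (fun h => absurd h.1 (by omega))]
              cases hR : bScanR data (k+1) with
              | some q =>
                dsimp only
                have hq := (bScanR_eq_some_iff data (k+1) q).mp hR
                simp only [show (q < i + 1) ↔ (q < i) from by constructor <;> (intro h; omega)]
              | none => rfl
        · rw [(hfr.2 k).2 (fun hcond => hdk (hcond.2.2.2 k (by omega) le_rfl).1), hout k hk,
            Ftgt_of_ne data distance i k hdk, Ftgt_of_ne data distance (i+1) k hdk]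
      · -- k strictly left of i
        have hki' : k < i := by omega
        by_cases hdk : data.getD k 0 = 0
        · rcases hRk : bScanR data (k+1) with _ | q
          · exact absurd ((bScanR_eq_none_iff data (k+1)).mp hRk i (by omega) hi) hii
          · have hq := (bScanR_eq_some_iff data (k+1) q).mp hRk
            have hqle : q ≤ i := by
              rcases Nat.lt_or_ge i q with h | h
              · exact absurd (hq.2.2.2 i (by omega) h) hii
              · omega
            rcases hLk : bScanL data k with _ | p
            · exact left_sweep_zero_case data distance i k q _ _ hx hi hki' hdk hRk hqle
                (fun p hp' => by rw [hLk] at hp'; cases hp')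
                (fun hcond => (hfl.2 k).1 hcond) (fun hcond => (hfl.2 k).2 hcond) hout1v
            · have hp := (bScanL_eq_some_iff data k p).mp hLk
              by_cases hLc : data.getD p 0 > 0 ∧ (k : Int) - (p : Int) ≤ distance
              · have hFik : Ftgt data distance i k = data.getD p 0 := by
                  rw [Ftgt_some data distance i k p hdk hLk, if_pos ⟨by omega, hLc.1, hLc.2⟩]
                have hres := (hfl.2 k).2 (fun hcond => by
                  have h0 := (hcond.2.2 k le_rfl (by omega)).2
                  rw [hout1v k (by omega), hFik] at h0
                  omega)
                rw [hres, hout1v k (by omega), hFik,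
                  Ftgt_some data distance (i+1) k p hdk hLk, if_pos ⟨by omega, hLc.1, hLc.2⟩]
              · exact left_sweep_zero_case data distance i k q _ _ hx hi hki' hdk hRk hqle
                  (fun p' hp' => by rw [hLk] at hp'; cases hp'; exact hLc)
                  (fun hcond => (hfl.2 k).1 hcond) (fun hcond => (hfl.2 k).2 hcond) hout1v
        · have hres := (hfl.2 k).2 (fun hcond => hdk (hcond.2.2 k le_rfl (by omega)).1)
          rw [hres, hout1v k (by omega),
            Ftgt_of_ne data distance i k hdk, Ftgt_of_ne data distance (i+1) k hdk]
  · rw [if_neg hx]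
    refine ⟨hlen, fun k hk => ?_⟩
    rw [Ftgt_succ_of_nonpos data distance i (by omega) k]
    exact hout k hk

def outerO (data : List Int) (distance : Int) (i : Nat) : List Int :=
  ((PySem.List.pyRange 0 (i : Int) 1).map (fun j => (j, PySem.List.pyGetD data j 0))).foldl
    (aStep data distance) data

lemma Ftgt_zero (data : List Int) (distance : Int) (k : Nat) :
    Ftgt data distance 0 k = data.getD k 0 := by
  by_cases hdk : data.getD k 0 = 0
  · rw [hdk]
    rcases hLk : bScanL data k with _ | p
    · rw [Ftgt_none data distance 0 k hdk hLk]
      rcases hRk : bScanR data (k+1) with _ | q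
      · rfl
      · dsimp only
        rw [if_neg (fun h => absurd h.1 (by omega))]
    · rw [Ftgt_some data distance 0 k p hdk hLk, if_neg (fun h => absurd h.1 (by omega))]
      rcases hRk : bScanR data (k+1) with _ | q
      · rfl
      · dsimp only
        rw [if_neg (fun h => absurd h.1 (by omega))]
  · rw [Ftgt_of_ne data distance 0 k hdk]

lemma Ftgt_final (data : List Int) (distance : Int) (k : Nat) (hk : k < data.length) :
    Ftgt data distance data.length k = bCell data distance k := by
  by_cases hdk : data.getD k 0 = 0
  · rcases hLk : bScanL data k with _ | p
    · rw [Ftgt_none data distance data.length k hdk hLk]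
      simp only [bCell, hLk, hdk]
      rcases hRk : bScanR data (k+1) with _ | q
      · rfl
      · have hq := (bScanR_eq_some_iff data (k+1) q).mp hRk
        dsimp only
        simp only [show (q < data.length) ↔ True from ⟨fun _ => trivial, fun _ => hq.2.1⟩, true_and]
        norm_num
    · have hp := (bScanL_eq_some_iff data k p).mp hLk
      rw [Ftgt_some data distance data.length k p hdk hLk]
      simp only [bCell, hLk, hdk]
      simp only [show (p < data.length) ↔ True from ⟨fun _ => trivial, fun _ => by omega⟩, true_and]
      rcases hRk : bScanR data (k+1) with _ | q
      · rfl
      · have hq := (bScanR_eq_some_iff data (k+1) q).mp hRk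
        dsimp only
        simp only [show (q < data.length) ↔ True from ⟨fun _ => trivial, fun _ => hq.2.1⟩, true_and]
        norm_num
  · rw [Ftgt_of_ne data distance data.length k hdk]
    simp only [bCell]
    rw [if_pos hdk]

lemma outerO_succ (data : List Int) (distance : Int) (i : Nat) :
    outerO data distance (i + 1) =
      aStep data distance (outerO data distance i) ((i : Int), PySem.List.pyGetD data (i : Int) 0) := by
  unfold outerO
  rw [show ((i + 1 : Nat) : Int) = (i : Int) + 1 by push_cast; ring,
    PySem.List.pyRange_one_succ_right (by omega : (0 : Int) ≤ (i : Int)), List.map_append,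
    List.foldl_append]
  rfl

lemma outer_invariant (data : List Int) (distance : Int) :
    ∀ i : Nat, i ≤ data.length →
      (outerO data distance i).length = data.length ∧
      ∀ k : Nat, k < data.length → (outerO data distance i).getD k 0 = Ftgt data distance i k := by
  intro i
  induction i with
  | zero =>
    intro _
    unfold outerO
    rw [show ((0 : Nat) : Int) = 0 from rfl, PySem.List.pyRange_one_eq_nil le_rfl]
    exact ⟨rfl, fun k hk => (Ftgt_zero data distance k).symm⟩
  | succ i ih =>
    intro hi
    obtain ⟨h1, h2⟩ := ih (by omega)
    rw [outerO_succ]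
    exact step_preserves data distance i (by omega) _ h1 h2

theorem final_eq (data : List Int) (distance : Int) :
    domino_series_expand data distance = domino_series_expand_alt data distance := by
  have he : domino_series_expand data distance = outerO data distance data.length := by
    unfold domino_series_expand outerO
    rw [PySem.List.enumerate_eq_map_pyRange (d := 0)]
    simp [PySem.List.len]
  obtain ⟨h1, h2⟩ := outer_invariant data distance data.length le_rfl
  have hlen2 : (domino_series_expand_alt data distance).length = data.length := by
    simp [domino_series_expand_alt]
  apply List.ext_getElem (by rw [he, h1, hlen2])
  intro k hk1 hk2
  have hkn : k < data.length := by rw [he, h1] at hk1; exact hk1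
  have hL : (domino_series_expand data distance)[k] = Ftgt data distance data.length k := by
    rw [← List.getD_eq_getElem _ 0 hk1, he, h2 k hkn]
  have hRt : (domino_series_expand_alt data distance)[k] = bCell data distance k := by
    rw [← List.getD_eq_getElem _ 0 hk2]
    simp [domino_series_expand_alt, List.getD_eq_getElem?_getD, hkn]
  rw [hL, hRt, Ftgt_final data distance k hkn]

-- ===== VERDICT (by name: the statement is the Claim_ definition above) =====
theorem domino_series_expand_spec : Claim_equal_domino_series_expand := by
  intro data distance _
  unfold Spec_domino_series_expand
  exact final_eq data distance
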